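-- pv_equiv track=rewrite | github.com/BatFresh/ICC_algorithm_implement | Dataset.py | connect_graph_succ
-- ===== SOURCE A (Python) =====
-- def connect_graph_succ(task_dict_list,visit_order):
--     succ = []
--     exit_node = []
--     entry_node = []
--     addnum = 1
--     task_entry_node_list = []
--     subtask_num = sum([len(task["workload"]) for task in task_dict_list]) + 1
--     for task_index in visit_order:
--         for i,task_succ in enumerate(task_dict_list[task_index]["succ"]):
--             if len(task_succ) == 0:
--                 task_succ = [subtask_num]
--                 succ.append(task_succ)
--             else:
--                 task_succ = [task_succ[i] + addnum for i in range(len(task_succ))]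
--                 succ.append(task_succ)
--         task_entry_node_list.append(addnum)
--         addnum = len(succ) + 1
--
--     succ.insert(0,task_entry_node_list)
--     succ.append(exit_node)
--
--     return succ
-- ===== SOURCE B (Python) =====
-- def connect_graph_succ(task_dict_list, visit_order):
--     # Divide-and-conquer: recursively split visit_order in half; each segment
--     # returns (entry_offsets, shifted_body_lists); the right half's base offset
--     # is the left half's offset plus the number of lists the left half emitted.
--     sentinel = sum(len(t["workload"]) for t in task_dict_list) + 1
--     def go(order, off):
--         if not order:
--             return [], []
--         if len(order) == 1:
--             succs = task_dict_list[order[0]]["succ"]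
--             return [off], [([sentinel] if not L else [v + off for v in L]) for L in succs]
--         mid = len(order) // 2
--         e1, b1 = go(order[:mid], off)
--         e2, b2 = go(order[mid:], off + len(b1))
--         return e1 + e2, b1 + b2
--     entries, body = go(visit_order, 1)
--     return [entries] + body + [[]]
-- ===== Notes on version B (the rewrite author's own statement) =====
-- stated objective: alternative
-- what changed: B replaces A's single linear pass threading mutable state (succ, addnum, entry list) with a divide-and-conquer recursion that splits visit_order in half, computes each half's (entries, body) independently, and merges by concatenation, deriving the right half's offset from the left half's emitted-list count.
import Mathlib
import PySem

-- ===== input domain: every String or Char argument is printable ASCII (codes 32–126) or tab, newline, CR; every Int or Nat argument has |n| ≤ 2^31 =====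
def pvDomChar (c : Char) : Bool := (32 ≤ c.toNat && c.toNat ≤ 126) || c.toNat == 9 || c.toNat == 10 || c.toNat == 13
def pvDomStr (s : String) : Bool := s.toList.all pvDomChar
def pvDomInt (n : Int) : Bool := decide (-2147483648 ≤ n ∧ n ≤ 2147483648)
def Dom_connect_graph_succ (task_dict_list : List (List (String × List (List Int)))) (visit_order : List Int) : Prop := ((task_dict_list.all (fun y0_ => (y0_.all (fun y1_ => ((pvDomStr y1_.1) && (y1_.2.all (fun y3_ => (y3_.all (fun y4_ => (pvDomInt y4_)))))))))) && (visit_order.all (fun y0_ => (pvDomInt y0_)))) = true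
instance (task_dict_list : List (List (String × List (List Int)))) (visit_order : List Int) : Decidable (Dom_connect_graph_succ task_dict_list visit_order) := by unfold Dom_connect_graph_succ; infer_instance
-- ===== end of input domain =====

-- B replaces A's single stateful linear pass by a divide-and-conquer recursion
-- (split visit_order in half, merge (entries, body) pairs); same return value
-- (objective: alternative).

-- shared helper: d[k] on an association list (first match), total form; exact under Pre_ (key present)
def pvDictGet (d : List (String × List (List Int))) (k : String) : List (List Int) :=
  ((d.find? (fun p => p.1 == k)).map (fun p => p.2)).getD []

-- ===== PORT A =====
def connect_graph_succ (task_dict_list : List (List (String × List (List Int)))) (visit_order : List Int) : List (List Int) :=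
  let subtask_num : Int := (task_dict_list.map (fun task => ((pvDictGet task "workload").length : Int))).sum + 1
  let st := visit_order.foldl
    (fun (st : List (List Int) × Int × List Int) task_index =>
      let succ := (pvDictGet (PySem.List.pyGetD task_dict_list task_index []) "succ").foldl
        (fun s task_succ =>
          if task_succ.length == 0 then s ++ [[subtask_num]]
          else s ++ [(PySem.List.pyRange 0 (task_succ.length : Int) 1).map
                       (fun i => PySem.List.pyGetD task_succ i 0 + st.2.1)])
        st.1
      (succ, (succ.length : Int) + 1, st.2.2 ++ [st.2.1]))
    ([], 1, [])
  ([st.2.2] ++ st.1) ++ [[]]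

-- ===== PORT B =====
-- B-side helpers: the succ-list of the task at index ti, and the per-list shift
def pvSuccs (tdl : List (List (String × List (List Int)))) (ti : Int) : List (List Int) :=
  pvDictGet (PySem.List.pyGetD tdl ti []) "succ"

def pvEmit (sn o : Int) (L : List Int) : List Int :=
  if L.isEmpty then [sn] else L.map (fun v => v + o)

-- the recursive divide-and-conquer worker of Source B (go)
def pvGo (tdl : List (List (String × List (List Int)))) (sn : Int)
    (order : List Int) (off : Int) : List Int × List (List Int) :=
  match order with
  | [] => ([], [])
  | [ti] => ([off], (pvSuccs tdl ti).map (pvEmit sn off))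
  | ti :: tj :: rest =>
    let mid := (ti :: tj :: rest).length / 2
    let p1 := pvGo tdl sn ((ti :: tj :: rest).take mid) off
    let p2 := pvGo tdl sn ((ti :: tj :: rest).drop mid) (off + (p1.2.length : Int))
    (p1.1 ++ p2.1, p1.2 ++ p2.2)
termination_by order.length
decreasing_by
  · simp [List.length_take]; omega
  · simp; omega

def connect_graph_succ_alt (task_dict_list : List (List (String × List (List Int)))) (visit_order : List Int) : List (List Int) :=
  let sentinel : Int := (task_dict_list.map (fun t => ((pvDictGet t "workload").length : Int))).sum + 1
  let p := pvGo task_dict_list sentinel visit_order 1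
  [p.1] ++ p.2 ++ [[]]

-- ===== PRECONDITION & SPEC =====
-- Pre_ excludes exactly the inputs where Python A raises: a task without a "workload" key
-- (KeyError in the subtask_num sum), or a visit_order index out of range (IndexError) or
-- pointing at a task without a "succ" key (KeyError).
def Pre_connect_graph_succ (task_dict_list : List (List (String × List (List Int)))) (visit_order : List Int) : Prop :=
  (task_dict_list.all (fun t => (t.find? (fun p => p.1 == "workload")).isSome)) = true ∧
  (visit_order.all (fun ti =>
    ((PySem.List.pyGet? task_dict_list ti).map
      (fun t => (t.find? (fun p => p.1 == "succ")).isSome)).getD false)) = true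
instance (task_dict_list : List (List (String × List (List Int)))) (visit_order : List Int) : Decidable (Pre_connect_graph_succ task_dict_list visit_order) := by unfold Pre_connect_graph_succ; infer_instance

def pvWitness_connect_graph_succ : (List (List (String × List (List Int)))) × List Int :=
  ([[("workload", [[1]]), ("succ", [[], [0]])]], [0])

def Spec_connect_graph_succ (task_dict_list : List (List (String × List (List Int)))) (visit_order : List Int) (out : List (List Int)) : Prop := out = connect_graph_succ_alt task_dict_list visit_order
instance (task_dict_list : List (List (String × List (List Int)))) (visit_order : List Int) (out : List (List Int)) : Decidable (Spec_connect_graph_succ task_dict_list visit_order out) := by unfold Spec_connect_graph_succ; infer_instance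

-- ===== CLAIM (what is proved, stated in full; the proofs are below) =====
def Claim_equal_connect_graph_succ : Prop := ∀ (task_dict_list : List (List (String × List (List Int)))) (visit_order : List Int), Dom_connect_graph_succ task_dict_list visit_order → Pre_connect_graph_succ task_dict_list visit_order → Spec_connect_graph_succ task_dict_list visit_order (connect_graph_succ task_dict_list visit_order)

-- ===== LEMMAS AND PROOFS =====

-- linear-recursion characterisations of the entry-offset list and of the body
def pvOffs (tdl : List (List (String × List (List Int)))) : List Int → Int → List Int
  | [], _ => []
  | ti :: rest, o => o :: pvOffs tdl rest (o + ((pvSuccs tdl ti).length : Int))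

def pvBod (tdl : List (List (String × List (List Int)))) (sn : Int) : List Int → Int → List (List Int)
  | [], _ => []
  | ti :: rest, o => (pvSuccs tdl ti).map (pvEmit sn o) ++ pvBod tdl sn rest (o + ((pvSuccs tdl ti).length : Int))

theorem pvBod_length (tdl : List (List (String × List (List Int)))) (sn : Int)
    (l : List Int) : ∀ o, ((pvBod tdl sn l o).length : Int)
      = (l.map (fun ti => ((pvSuccs tdl ti).length : Int))).sum := by
  induction l with
  | nil => intro o; simp [pvBod]
  | cons ti rest ih => intro o; simp [pvBod, ih]

theorem pvOffs_append (tdl : List (List (String × List (List Int))))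
    (l r : List Int) : ∀ o, pvOffs tdl (l ++ r) o
      = pvOffs tdl l o ++ pvOffs tdl r (o + (l.map (fun ti => ((pvSuccs tdl ti).length : Int))).sum) := by
  induction l with
  | nil => intro o; simp [pvOffs]
  | cons ti rest ih =>
    intro o
    simp only [List.cons_append, pvOffs, ih]
    simp [add_assoc]

theorem pvBod_append (tdl : List (List (String × List (List Int)))) (sn : Int)
    (l r : List Int) : ∀ o, pvBod tdl sn (l ++ r) o
      = pvBod tdl sn l o ++ pvBod tdl sn r (o + (l.map (fun ti => ((pvSuccs tdl ti).length : Int))).sum) := by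
  induction l with
  | nil => intro o; simp [pvBod]
  | cons ti rest ih =>
    intro o
    simp only [List.cons_append, pvBod, ih]
    simp [add_assoc]

theorem pvGo_eq (tdl : List (List (String × List (List Int)))) (sn : Int)
    (order : List Int) (off : Int) :
    pvGo tdl sn order off = (pvOffs tdl order off, pvBod tdl sn order off) := by
  fun_induction pvGo tdl sn order off with
  | case1 => simp [pvOffs, pvBod]
  | case2 off ti => simp [pvOffs, pvBod]
  | case3 off ti tj rest mid p1 p2 ih1 ihdup ih2 =>
    clear ihdup
    simp only [p2, p1, ih1, pvBod_length] at ih2 ⊢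
    rw [ih2]
    conv_rhs => rw [← List.take_append_drop mid (ti :: tj :: rest)]
    rw [pvOffs_append, pvBod_append]

theorem pvMapRange (xs : List Int) (a : Int) :
    (PySem.List.pyRange 0 (xs.length : Int) 1).map (fun i => PySem.List.pyGetD xs i 0 + a)
      = xs.map (fun v => v + a) := by
  have h : (fun i => PySem.List.pyGetD xs i 0 + a)
      = (fun v => v + a) ∘ (fun i => PySem.List.pyGetD xs i 0) := rfl
  rw [h, ← List.map_map, PySem.List.map_pyGetD_pyRange_zero']

theorem pvInnerFold (sn a : Int) (s0 : List (List Int)) (S : List (List Int)) :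
    S.foldl (fun s task_succ =>
        if task_succ.length == 0 then s ++ [[sn]]
        else s ++ [(PySem.List.pyRange 0 (task_succ.length : Int) 1).map
                     (fun i => PySem.List.pyGetD task_succ i 0 + a)]) s0
      = s0 ++ S.map (pvEmit sn a) := by
  induction S generalizing s0 with
  | nil => simp
  | cons L rest ih =>
    simp only [List.foldl_cons, List.map_cons]
    rw [ih]
    cases L with
    | nil => simp [pvEmit]
    | cons x xs =>
      have hm := pvMapRange (x :: xs) a
      simp only [List.length_cons] at hm
      push_cast at hm
      simp [pvEmit, hm, List.append_assoc]

theorem pvFoldA (tdl : List (List (String × List (List Int)))) (sn : Int)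
    (vo : List Int) : ∀ (s0 : List (List Int)) (t0 : List Int),
    vo.foldl
      (fun (st : List (List Int) × Int × List Int) task_index =>
        let succ := (pvDictGet (PySem.List.pyGetD tdl task_index []) "succ").foldl
          (fun s task_succ =>
            if task_succ.length == 0 then s ++ [[sn]]
            else s ++ [(PySem.List.pyRange 0 (task_succ.length : Int) 1).map
                         (fun i => PySem.List.pyGetD task_succ i 0 + st.2.1)])
          st.1
        (succ, (succ.length : Int) + 1, st.2.2 ++ [st.2.1]))
      (s0, (s0.length : Int) + 1, t0)
      = (s0 ++ pvBod tdl sn vo ((s0.length : Int) + 1),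
         ((s0 ++ pvBod tdl sn vo ((s0.length : Int) + 1)).length : Int) + 1,
         t0 ++ pvOffs tdl vo ((s0.length : Int) + 1)) := by
  induction vo with
  | nil => intro s0 t0; simp [pvBod, pvOffs]
  | cons ti rest ih =>
    intro s0 t0
    simp only [List.foldl_cons]
    rw [pvInnerFold]
    rw [ih (s0 ++ (pvDictGet (PySem.List.pyGetD tdl ti []) "succ").map (pvEmit sn ((s0.length : Int) + 1))) (t0 ++ [(s0.length : Int) + 1])]
    have harg : ((s0.length : Int)) + ((pvDictGet (PySem.List.pyGetD tdl ti []) "succ").length : Int) + 1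
        = ((s0.length : Int) + 1) + ((pvDictGet (PySem.List.pyGetD tdl ti []) "succ").length : Int) := by ring
    simp [pvBod, pvOffs, pvSuccs, harg, List.append_assoc]

-- ===== VERDICT (by name: the statement is the Claim_ definition above) =====
theorem connect_graph_succ_spec : Claim_equal_connect_graph_succ := by
  intro tdl vo _ _
  unfold Spec_connect_graph_succ connect_graph_succ connect_graph_succ_alt
  dsimp only
  have hA := pvFoldA tdl ((tdl.map (fun task => ((pvDictGet task "workload").length : Int))).sum + 1) vo [] []
  simp only [List.length_nil, Int.natCast_zero, List.nil_append, zero_add] at hA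
  rw [hA, pvGo_eq]
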